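-- pv_equiv track=rewrite | github.com/lukastk/repoyard | pts/mod/_utils/01_rclone.pct.py | _rclone_cmd_helper
-- ===== SOURCE A (Python) =====
-- def _rclone_cmd_helper(
--     cmd_name: str,
--     rclone_config_path: str,
--     source: str,
--     source_path: str,
--     dest: str,
--     dest_path: str,
--     include: list[str],
--     exclude: list[str],
--     filter: list[str],
--     include_file: str|None,
--     exclude_file: str|None,
--     filters_file: str|None,
--     dry_run: bool,
--     progress: bool,
-- ) -> list[str]:
--     source_spec = f"{source}:{source_path}" if source else source_path
--     dest_spec = f"{dest}:{dest_path}" if dest else dest_path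
--     cmd = ["rclone", cmd_name, '--config', rclone_config_path, source_spec, dest_spec]
--     if dry_run:
--         cmd.append("--dry-run")
--     for f in include:
--         cmd.append(f"--include")
--         cmd.append(f)
--     if include_file is not None:
--         cmd.append(f"--include-from")
--         cmd.append(include_file)
--     for f in exclude:
--         cmd.append(f"--exclude")
--         cmd.append(f)
--     if exclude_file is not None:
--         cmd.append(f"--exclude-from")
--         cmd.append(exclude_file)
--     for f in filter:
--         cmd.append(f"--filter")
--         cmd.append(f)
--     if filters_file is not None:
--         cmd.append("--filters-file")
--         cmd.append(filters_file)
--     if progress: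
--         cmd.append("--progress")
--     return cmd
-- ===== SOURCE B (Python) =====
-- def _rclone_cmd_helper(
--     cmd_name,
--     rclone_config_path,
--     source,
--     source_path,
--     dest,
--     dest_path,
--     include,
--     exclude,
--     filter,
--     include_file,
--     exclude_file,
--     filters_file,
--     dry_run,
--     progress,
-- ):
--     def spec(host, path):
--         return f"{host}:{path}" if host else path
--
--     # ordered table of option directives: (flag, kind, value)
--     directives = [
--         ("--dry-run", "bool", dry_run),
--         ("--include", "list", include),
--         ("--include-from", "single", include_file),
--         ("--exclude", "list", exclude),
--         ("--exclude-from", "single", exclude_file),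
--         ("--filter", "list", filter),
--         ("--filters-file", "single", filters_file),
--         ("--progress", "bool", progress),
--     ]
--
--     def render(flag, kind, value):
--         if kind == "bool":
--             return [flag] if value else []
--         if kind == "single":
--             return [] if value is None else [flag, value]
--         return [x for item in value for x in (flag, item)]
--
--     head = ["rclone", cmd_name, "--config", rclone_config_path,
--             spec(source, source_path), spec(dest, dest_path)]
--     return head + [arg for d in directives for arg in render(*d)]
-- ===== Notes on version B (the rewrite author's own statement) =====
-- stated objective: simpler
-- what changed: Replaces the dozen inline append branches with an ordered data table of (flag, kind, value) directives rendered by one uniform function and flattened onto the fixed head.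
import Mathlib
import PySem

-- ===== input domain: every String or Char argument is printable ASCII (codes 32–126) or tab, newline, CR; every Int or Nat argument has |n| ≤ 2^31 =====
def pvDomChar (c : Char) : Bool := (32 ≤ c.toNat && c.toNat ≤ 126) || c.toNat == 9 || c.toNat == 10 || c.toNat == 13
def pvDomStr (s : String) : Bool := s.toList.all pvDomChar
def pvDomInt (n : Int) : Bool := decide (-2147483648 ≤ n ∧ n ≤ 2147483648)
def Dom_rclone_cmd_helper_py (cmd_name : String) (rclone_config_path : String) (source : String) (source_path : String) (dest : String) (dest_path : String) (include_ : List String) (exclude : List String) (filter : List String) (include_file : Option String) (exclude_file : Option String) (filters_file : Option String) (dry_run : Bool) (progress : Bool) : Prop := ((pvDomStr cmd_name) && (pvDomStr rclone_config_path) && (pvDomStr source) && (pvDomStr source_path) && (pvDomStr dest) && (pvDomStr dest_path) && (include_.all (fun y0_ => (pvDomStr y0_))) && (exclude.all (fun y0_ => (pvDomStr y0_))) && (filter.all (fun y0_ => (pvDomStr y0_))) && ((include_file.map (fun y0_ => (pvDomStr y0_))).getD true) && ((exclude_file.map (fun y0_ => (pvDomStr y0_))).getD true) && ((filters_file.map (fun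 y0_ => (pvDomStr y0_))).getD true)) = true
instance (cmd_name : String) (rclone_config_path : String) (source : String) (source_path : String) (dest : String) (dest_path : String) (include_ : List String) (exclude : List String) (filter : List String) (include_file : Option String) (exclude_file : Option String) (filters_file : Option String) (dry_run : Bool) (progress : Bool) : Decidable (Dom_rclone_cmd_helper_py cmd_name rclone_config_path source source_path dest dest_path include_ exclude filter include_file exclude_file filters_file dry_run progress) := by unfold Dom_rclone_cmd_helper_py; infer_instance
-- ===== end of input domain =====

-- B replaces A's dozen inline append branches with an ordered table of (flag, kind, value) directives rendered by one uniform function (objective: simpler).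


-- ===== PORT A =====
def rclone_cmd_helper_py (cmd_name : String) (rclone_config_path : String) (source : String) (source_path : String) (dest : String) (dest_path : String) (include_ : List String) (exclude : List String) (filter : List String) (include_file : Option String) (exclude_file : Option String) (filters_file : Option String) (dry_run : Bool) (progress : Bool) : List String :=
  let source_spec := if source ≠ "" then source ++ ":" ++ source_path else source_path
  let dest_spec := if dest ≠ "" then dest ++ ":" ++ dest_path else dest_path
  let cmd := ["rclone", cmd_name, "--config", rclone_config_path, source_spec, dest_spec]
  let cmd := if dry_run then cmd ++ ["--dry-run"] else cmd
  let cmd := include_.foldl (fun acc f => (acc ++ ["--include"]) ++ [f]) cmd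
  let cmd := match include_file with | some v => (cmd ++ ["--include-from"]) ++ [v] | none => cmd
  let cmd := exclude.foldl (fun acc f => (acc ++ ["--exclude"]) ++ [f]) cmd
  let cmd := match exclude_file with | some v => (cmd ++ ["--exclude-from"]) ++ [v] | none => cmd
  let cmd := filter.foldl (fun acc f => (acc ++ ["--filter"]) ++ [f]) cmd
  let cmd := match filters_file with | some v => (cmd ++ ["--filters-file"]) ++ [v] | none => cmd
  let cmd := if progress then cmd ++ ["--progress"] else cmd
  cmd

-- ===== PORT B =====
-- B-side: one value type for the three directive kinds, an ordered table, one renderer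
inductive PvDirVal where
  | bool : Bool → PvDirVal
  | single : Option String → PvDirVal
  | list : List String → PvDirVal
deriving DecidableEq, Repr

def pvRender (flag : String) (v : PvDirVal) : List String :=
  match v with
  | .bool b => if b then [flag] else []
  | .single o => match o with | none => [] | some s => [flag, s]
  | .list xs => xs.flatMap (fun item => [flag, item])

def pvSpec (host : String) (path : String) : String :=
  if host ≠ "" then host ++ ":" ++ path else path

def rclone_cmd_helper_py_alt (cmd_name : String) (rclone_config_path : String) (source : String) (source_path : String) (dest : String) (dest_path : String) (include_ : List String) (exclude : List String) (filter : List String) (include_file : Option String) (exclude_file : Option String) (filters_file : Option String) (dry_run : Bool) (progress : Bool) : List String :=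
  let directives : List (String × PvDirVal) :=
    [("--dry-run", .bool dry_run),
     ("--include", .list include_),
     ("--include-from", .single include_file),
     ("--exclude", .list exclude),
     ("--exclude-from", .single exclude_file),
     ("--filter", .list filter),
     ("--filters-file", .single filters_file),
     ("--progress", .bool progress)]
  let head := ["rclone", cmd_name, "--config", rclone_config_path,
               pvSpec source source_path, pvSpec dest dest_path]
  head ++ directives.flatMap (fun d => pvRender d.1 d.2)

-- ===== PRECONDITION & SPEC =====
def Spec_rclone_cmd_helper_py (cmd_name : String) (rclone_config_path : String) (source : String) (source_path : String) (dest : String) (dest_path : String) (include_ : List String) (exclude : List String) (filter : List String) (include_file : Option String) (exclude_file : Option String) (filters_file : Option String) (dry_run : Bool) (progress : Bool) (out : List String) : Prop := out = rclone_cmd_helper_py_alt cmd_name rclone_config_path source source_path dest dest_path include_ exclude filter include_file exclude_file filters_file dry_run progress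
instance (cmd_name : String) (rclone_config_path : String) (source : String) (source_path : String) (dest : String) (dest_path : String) (include_ : List String) (exclude : List String) (filter : List String) (include_file : Option String) (exclude_file : Option String) (filters_file : Option String) (dry_run : Bool) (progress : Bool) (out : List String) : Decidable (Spec_rclone_cmd_helper_py cmd_name rclone_config_path source source_path dest dest_path include_ exclude filter include_file exclude_file filters_file dry_run progress out) := by unfold Spec_rclone_cmd_helper_py; infer_instance

-- ===== CLAIM (what is proved, stated in full; the proofs are below) =====
def Claim_equal_rclone_cmd_helper_py : Prop := ∀ (cmd_name : String) (rclone_config_path : String) (source : String) (source_path : String) (dest : String) (dest_path : String) (include_ : List String) (exclude : List String) (filter : List String) (include_file : Option String) (exclude_file : Option String) (filters_file : Option String) (dry_run : Bool) (progress : Bool), Dom_rclone_cmd_helper_py cmd_name rclone_config_path source source_path dest dest_path include_ exclude filter include_file exclude_file filters_file dry_run progress → Spec_rclone_cmd_helper_py cmd_name rclone_config_path source source_path dest dest_path include_ exclude filter include_file exclude_file filters_file dry_run progress (rclone_cmd_helper_py cmd_name rclone_config_path source source_path dest dest_path include_ exclude filter include_file exclude_file filters_file dry_run progress)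

-- ===== LEMMAS AND PROOFS =====

-- ===== VERDICT (by name: the statement is the Claim_ definition above) =====
theorem rclone_cmd_helper_py_spec : Claim_equal_rclone_cmd_helper_py := by
  intro cmd_name rclone_config_path source source_path dest dest_path include_ exclude filter include_file exclude_file filters_file dry_run progress _
  unfold Spec_rclone_cmd_helper_py rclone_cmd_helper_py rclone_cmd_helper_py_alt pvSpec pvRender
  cases dry_run <;> cases progress <;> cases include_file <;> cases exclude_file <;> cases filters_file <;>
    simp [List.flatMap_def, List.append_assoc]
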